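-- pv_equiv track=rewrite | github.com/skrjha20/Chatbot-Voice | chatbot.py | get_actual_planned
-- ===== SOURCE A (Python) =====
-- actual_type = ['actual']
--
-- plan_type = ['plan', 'planned', 'plant', 'land']
--
-- def get_actual_planned(clean_words):
--     actual_planned = ''
--     for i in range(len(clean_words)):
--         if clean_words[i] in actual_type:
--             actual_planned = "actual"
--         if clean_words[i] in plan_type:
--             actual_planned = "planned"
--     if actual_planned == '':
--         actual_planned = "Unable to identify actual or planned, please specify again"
--     return actual_planned
-- ===== SOURCE B (Python) =====
-- actual_type = ['actual']
--
-- plan_type = ['plan', 'planned', 'plant', 'land']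
--
-- def get_actual_planned(clean_words):
--     last = next((w for w in reversed(clean_words) if w in actual_type or w in plan_type), None)
--     if last is None:
--         return "Unable to identify actual or planned, please specify again"
--     return "actual" if last in actual_type else "planned"
-- ===== Notes on version B (the rewrite author's own statement) =====
-- stated objective: simpler
-- what changed: Instead of a forward loop that reassigns an accumulator at every matching word, B finds the last matching word by a reverse scan with early exit and classifies that single word (or returns the default if none matches).
import Mathlib
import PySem

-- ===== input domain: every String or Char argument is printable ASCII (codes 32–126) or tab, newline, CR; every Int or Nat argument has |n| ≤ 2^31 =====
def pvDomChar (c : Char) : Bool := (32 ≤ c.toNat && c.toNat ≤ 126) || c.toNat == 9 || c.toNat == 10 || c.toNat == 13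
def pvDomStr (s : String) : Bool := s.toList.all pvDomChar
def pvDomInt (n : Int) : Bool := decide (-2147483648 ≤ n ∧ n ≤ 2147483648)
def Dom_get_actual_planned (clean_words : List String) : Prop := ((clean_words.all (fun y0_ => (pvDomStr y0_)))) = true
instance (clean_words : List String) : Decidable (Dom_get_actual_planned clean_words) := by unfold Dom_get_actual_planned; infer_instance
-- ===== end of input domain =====

-- B changes the decomposition: reverse scan for the last matching word, then classify it (simpler; not faster).

def actual_type : List String := ["actual"]

def plan_type : List String := ["plan", "planned", "plant", "land"]

-- ===== PORT A =====
-- literal transliteration: forward loop over the words, reassigning the accumulator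
def get_actual_planned (clean_words : List String) : String :=
  let actual_planned :=
    clean_words.foldl (fun acc w =>
      let acc := if w ∈ actual_type then "actual" else acc
      if w ∈ plan_type then "planned" else acc) ""
  if actual_planned = "" then
    "Unable to identify actual or planned, please specify again"
  else actual_planned

-- ===== PORT B =====
-- literal transliteration of Source B: first matching word of the reversed list, then classify it
def get_actual_planned_alt (clean_words : List String) : String :=
  match clean_words.reverse.find? (fun w => w ∈ actual_type || w ∈ plan_type) with
  | none => "Unable to identify actual or planned, please specify again"
  | some last => if last ∈ actual_type then "actual" else "planned"

-- ===== PRECONDITION & SPEC =====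
def Spec_get_actual_planned (clean_words : List String) (out : String) : Prop := out = get_actual_planned_alt clean_words
instance (clean_words : List String) (out : String) : Decidable (Spec_get_actual_planned clean_words out) := by unfold Spec_get_actual_planned; infer_instance

-- ===== CLAIM (what is proved, stated in full; the proofs are below) =====
def Claim_equal_get_actual_planned : Prop := ∀ (clean_words : List String), Dom_get_actual_planned clean_words → Spec_get_actual_planned clean_words (get_actual_planned clean_words)

-- ===== LEMMAS AND PROOFS =====

-- the loop body of A
def pvStep (acc w : String) : String :=
  let acc := if w ∈ actual_type then "actual" else acc
  if w ∈ plan_type then "planned" else acc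

-- A's fold equals: classify the first match of the reversed list, default = initial accumulator
theorem pv_foldl_eq (l : List String) (s : String) :
    l.foldl pvStep s =
      match l.reverse.find? (fun w => w ∈ actual_type || w ∈ plan_type) with
      | none => s
      | some last => if last ∈ actual_type then "actual" else "planned" := by
  induction l generalizing s with
  | nil => simp
  | cons w l ih =>
      simp only [List.foldl_cons, List.reverse_cons, List.find?_append, ih]
      cases h : l.reverse.find? (fun w => w ∈ actual_type || w ∈ plan_type) with
      | some last => simp
      | none =>
          by_cases ha : w ∈ actual_type <;> by_cases hp : w ∈ plan_type <;>
            simp_all [pvStep, List.find?, actual_type, plan_type]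

-- ===== VERDICT (by name: the statement is the Claim_ definition above) =====
theorem get_actual_planned_spec : Claim_equal_get_actual_planned := by
  intro clean_words _
  show _ = _
  rw [get_actual_planned, get_actual_planned_alt]
  show (if clean_words.foldl pvStep "" = "" then _ else clean_words.foldl pvStep "") = _
  rw [pv_foldl_eq]
  cases h : clean_words.reverse.find? (fun w => w ∈ actual_type || w ∈ plan_type) with
  | none => simp
  | some last =>
      have := List.find?_some h
      simp only
      by_cases ha : last ∈ actual_type <;> simp_all [actual_type, plan_type]
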